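-- pv_equiv track=rewrite | github.com/Dhruvsh02/DSA | string /z_function.py | search
-- ===== SOURCE A (Python) =====
-- def computeZ(s):
--     n = len(s)
--     z = [0] * n
--     left , right = 0 , 0
--     for i in range(1,n):
--         if i > right :
--             while i+z[i] < n and s[i+z[i]] == s[z[i]]:
--                 z[i] += 1
--         else:
--             if i+z[i-left] <= right:
--                 z[i] = z[i-left]
--             else:
--                 z[i] = right-i+1
--                 while i+z[i] < n and s[i+z[i]] == s[z[i]] :
--                     z[i] += 1
--         left,right = i,i+z[i]-1
--     return z
--
-- def search(pattern,text):
--     n = len(text)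
--     m = len(pattern)
--     s = pattern + '$' + text
--
--     z = computeZ(s)
--
--     ans = []
--     for i in range(m+1,len(s)):
--         if z[i] == m:
--             ans.append(i-(m+1))
--     return ans
-- ===== SOURCE B (Python) =====
-- def search(pattern, text):
--     m, n = len(pattern), len(text)
--     return [i for i in range(n) if text[i:i+m] == pattern]
-- ===== Notes on version B (the rewrite author's own statement) =====
-- stated objective: simpler
-- what changed: Replaced the Z-function over 'pattern$text' (computeZ with its left/right window and two while-loops) by a single direct scan comparing the slice text[i:i+m] at every start position.
-- intended difference: When pattern+'$' occurs in text, A silently drops every occurrence of pattern that is immediately followed by '$' (its sentinel character collides with text content), while B reports all occurrences; B's value is the intended set of match positions. — e.g. on search("a", "a$"): A returns [], B returns [0]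
import Mathlib
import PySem

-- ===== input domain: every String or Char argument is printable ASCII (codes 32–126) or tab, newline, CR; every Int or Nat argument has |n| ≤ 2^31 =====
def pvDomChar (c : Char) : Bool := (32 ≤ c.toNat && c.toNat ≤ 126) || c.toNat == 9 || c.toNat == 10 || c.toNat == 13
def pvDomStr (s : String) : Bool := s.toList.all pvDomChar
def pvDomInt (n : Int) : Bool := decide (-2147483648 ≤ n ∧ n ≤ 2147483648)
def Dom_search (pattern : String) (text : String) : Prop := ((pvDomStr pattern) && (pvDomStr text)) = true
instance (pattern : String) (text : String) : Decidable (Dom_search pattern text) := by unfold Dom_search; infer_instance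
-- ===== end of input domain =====

-- B replaces A's Z-function-over-'pattern$text' matcher by a direct slice comparison at every
-- start position (simpler: no Z-array, no left/right window); on inputs where pattern+'$'
-- occurs in text, A's sentinel collides with the text and A drops matches that B reports (see D_search).

-- ===== PORT A =====
-- the inner `while i+z[i] < n and s[i+z[i]] == s[z[i]]: z[i] += 1` loop of computeZ;
-- the fuel argument only bounds the iteration count (the while loop runs < len(s) times).
def zextGo (s : List Char) (i : Nat) : Nat → Nat → Nat
  | 0, cur => cur
  | fuel + 1, cur =>
    if i + cur < s.length ∧ s.getD (i + cur) ' ' = s.getD cur ' ' then zextGo s i fuel (cur + 1)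
    else cur

def zext (s : List Char) (i cur : Nat) : Nat := zextGo s i (s.length - (i + cur)) cur

-- the `for i in range(1, n)` loop of computeZ, state (z, left, right); fuel = remaining iterations
def zloopGo (s : List Char) : Nat → Nat → List Nat → Nat → Nat → List Nat
  | 0, _, z, _, _ => z
  | fuel + 1, i, z, left, right =>
    if i < s.length then
      let zi : Nat :=
        if right < i then zext s i 0
        else if i + z.getD (i - left) 0 ≤ right then z.getD (i - left) 0
        else zext s i (right - i + 1)
      zloopGo s fuel (i + 1) (z.set i zi) i (i + zi - 1)
    else z

-- indices, lengths and z-values are all nonnegative Python ints, carried as Nat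
def computeZ (s : List Char) : List Nat :=
  zloopGo s s.length 1 (List.replicate s.length 0) 0 0

def search (pattern : String) (text : String) : List Int :=
  let s : List Char := pattern.toList ++ '$' :: text.toList
  let m : Nat := pattern.toList.length
  let z : List Nat := computeZ s
  (List.range' (m + 1) (s.length - (m + 1))).foldl
    (fun ans i => if z.getD i 0 = m then ans ++ [(i : Int) - ((m : Int) + 1)] else ans) []

-- ===== PORT B =====
def search_alt (pattern : String) (text : String) : List Int :=
  let m : Int := pattern.toList.length
  let n : Int := text.toList.length
  (PySem.List.pyRange 0 n 1).filter
    (fun i => PySem.List.slice text.toList (some i) (some (i + m)) == pattern.toList)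

-- ===== PRECONDITION & SPEC =====
-- When pattern+'$' occurs in text, A silently drops every occurrence of pattern immediately
-- followed by '$' (its sentinel collides with text content), while B reports all occurrences;
-- B's value is the intended set of match positions.
-- "pattern+'$' occurs in text": true iff some '$' in text is immediately preceded by pattern
-- (scans text once; compares a slice only at the positions holding '$')
def dollarFollows (p t : List Char) : Bool :=
  (List.range t.length).any (fun k =>
    t.getD k ' ' == '$' && decide (p.length ≤ k) && ((t.drop (k - p.length)).take p.length == p))

def D_search (pattern : String) (text : String) : Prop :=
  dollarFollows pattern.toList text.toList = true
instance (pattern : String) (text : String) : Decidable (D_search pattern text) := by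
  unfold D_search; infer_instance

def Spec_search (pattern : String) (text : String) (out : List Int) : Prop :=
  ¬ D_search pattern text → out = search_alt pattern text
instance (pattern : String) (text : String) (out : List Int) : Decidable (Spec_search pattern text out) := by
  unfold Spec_search; infer_instance

def pvDiffWitness_search : String × String := ("a", "a$")
def pvDiffWitnessOut_search : (List Int) × (List Int) := ([], [0])

-- ===== CLAIM (what is proved, stated in full; the proofs are below) =====
def Claim_unchanged_search : Prop := ∀ (pattern : String) (text : String), Dom_search pattern text → Spec_search pattern text (search pattern text)
def Claim_changed_search : Prop := Dom_search (pvDiffWitness_search.1) (pvDiffWitness_search.2) ∧ D_search (pvDiffWitness_search.1) (pvDiffWitness_search.2) ∧ search (pvDiffWitness_search.1) (pvDiffWitness_search.2) = pvDiffWitnessOut_search.1 ∧ search_alt (pvDiffWitness_search.1) (pvDiffWitness_search.2) = pvDiffWitnessOut_search.2 ∧ pvDiffWitnessOut_search.1 ≠ pvDiffWitnessOut_search.2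
def Claim_exact_search : Prop := ∀ (pattern : String) (text : String), Dom_search pattern text → D_search pattern text → search pattern text ≠ search_alt pattern text

-- ===== LEMMAS AND PROOFS =====

-- length of the longest common prefix of two character lists
def lcp : List Char → List Char → Nat
  | a :: as, b :: bs => if a = b then lcp as bs + 1 else 0
  | _, _ => 0

-- the true Z-value of s at i
def zv (s : List Char) (i : Nat) : Nat := lcp s (s.drop i)

-- "pattern occurs in t at position j"
def occAt (p t : List Char) (j : Nat) : Bool := decide (p <+: t.drop j)

-- A's effective acceptance condition: occurrence at j, not immediately followed by '$'
def aCondB (p t : List Char) (j : Nat) : Bool :=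
  occAt p t j && (decide (j + p.length = t.length) || !decide (t.getD (j + p.length) ' ' = '$'))

theorem getD_drop (s : List Char) (i t : Nat) (d : Char) :
    (s.drop i).getD t d = s.getD (i + t) d := by
  simp [List.getD_eq_getElem?_getD, List.getElem?_drop]

theorem lcp_le_right (a b : List Char) : lcp a b ≤ b.length := by
  induction a generalizing b with
  | nil => simp [lcp]
  | cons x as ih =>
    cases b with
    | nil => simp [lcp]
    | cons y bs =>
      simp only [lcp]
      split
      · simpa using ih bs
      · simp

theorem lcp_getD (a b : List Char) (t : Nat) (h : t < lcp a b) :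
    a.getD t ' ' = b.getD t ' ' := by
  induction a generalizing b t with
  | nil => simp [lcp] at h
  | cons x as ih =>
    cases b with
    | nil => simp [lcp] at h
    | cons y bs =>
      simp only [lcp] at h
      split at h
      · rename_i hxy
        cases t with
        | zero => simpa using hxy
        | succ t' =>
          simp only [List.getD_cons_succ]
          exact ih bs t' (by omega)
      · omega

theorem lcp_stop (a b : List Char) (h1 : lcp a b < a.length) (h2 : lcp a b < b.length) :
    a.getD (lcp a b) ' ' ≠ b.getD (lcp a b) ' ' := by
  induction a generalizing b with
  | nil => simp at h1
  | cons x as ih =>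
    cases b with
    | nil => simp at h2
    | cons y bs =>
      by_cases hxy : x = y
      · have hl : lcp (x :: as) (y :: bs) = lcp as bs + 1 := by simp [lcp, hxy]
        rw [hl] at h1 h2 ⊢
        simp only [List.getD_cons_succ]
        exact ih bs (by simpa using h1) (by simpa using h2)
      · have hl : lcp (x :: as) (y :: bs) = 0 := by simp [lcp, hxy]
        rw [hl]
        simpa using hxy

theorem lcp_eq_of (a b : List Char) (k : Nat) (hka : k ≤ a.length) (hkb : k ≤ b.length)
    (hm : ∀ t, t < k → a.getD t ' ' = b.getD t ' ')
    (hs : k = a.length ∨ k = b.length ∨ a.getD k ' ' ≠ b.getD k ' ') : lcp a b = k := by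
  induction a generalizing b k with
  | nil =>
    have : k = 0 := by simpa using hka
    subst this
    cases b <;> simp [lcp]
  | cons x as ih =>
    cases b with
    | nil =>
      have : k = 0 := by simpa using hkb
      subst this
      simp [lcp]
    | cons y bs =>
      cases k with
      | zero =>
        rcases hs with hs | hs | hs
        · simp at hs
        · simp at hs
        · have hxy : x ≠ y := by simpa using hs
          simp [lcp, hxy]
      | succ k' =>
        have hxy : x = y := by simpa using hm 0 (by omega)
        have hl : lcp (x :: as) (y :: bs) = lcp as bs + 1 := by simp [lcp, hxy]
        rw [hl]
        have hres : lcp as bs = k' := by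
          apply ih bs k' (by simpa using hka) (by simpa using hkb)
          · intro t ht
            simpa using hm (t + 1) (by omega)
          · rcases hs with hs | hs | hs
            · left; simpa using hs
            · right; left; simpa using hs
            · right; right; simpa using hs
        omega

theorem zv_eq_iff (s : List Char) (i m : Nat) (hi : 1 ≤ i) (hin : i ≤ s.length) :
    zv s i = m ↔ (i + m ≤ s.length ∧ (∀ t, t < m → s.getD t ' ' = s.getD (i + t) ' ') ∧
      (i + m = s.length ∨ s.getD m ' ' ≠ s.getD (i + m) ' ')) := by
  unfold zv
  constructor
  · rintro rfl
    have hlr := lcp_le_right s (s.drop i)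
    rw [List.length_drop] at hlr
    refine ⟨by omega, ?_, ?_⟩
    · intro t ht
      have := lcp_getD s (s.drop i) t ht
      rwa [getD_drop] at this
    · by_cases hc : lcp s (s.drop i) = s.length - i
      · left; omega
      · right
        have h1 : lcp s (s.drop i) < s.length := by omega
        have h2 : lcp s (s.drop i) < (s.drop i).length := by rw [List.length_drop]; omega
        have := lcp_stop s (s.drop i) h1 h2
        rwa [getD_drop] at this
  · rintro ⟨h1, h2, h3⟩
    apply lcp_eq_of
    · omega
    · rw [List.length_drop]; omega
    · intro t ht
      rw [getD_drop]
      exact h2 t ht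
    · rcases h3 with h3 | h3
      · right; left; rw [List.length_drop]; omega
      · right; right; rw [getD_drop]; exact h3

theorem zv_of_stop (s : List Char) (i cur : Nat) (hi : 1 ≤ i) (hin : i ≤ s.length)
    (h : ∀ t, t < cur → i + t < s.length ∧ s.getD (i + t) ' ' = s.getD t ' ')
    (hstop : ¬(i + cur < s.length ∧ s.getD (i + cur) ' ' = s.getD cur ' ')) : zv s i = cur := by
  have hle : i + cur ≤ s.length := by
    cases cur with
    | zero => omega
    | succ c => have := (h c (by omega)).1; omega
  refine (zv_eq_iff s i cur hi hin).mpr ⟨hle, fun t ht => (h t ht).2.symm, ?_⟩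
  by_cases hA : i + cur < s.length
  · right
    intro he
    exact hstop ⟨hA, he.symm⟩
  · left; omega

theorem zextGo_eq (s : List Char) (i : Nat) (hi : 1 ≤ i) (hin : i ≤ s.length) :
    ∀ fuel cur, s.length ≤ i + cur + fuel →
    (∀ t, t < cur → i + t < s.length ∧ s.getD (i + t) ' ' = s.getD t ' ') →
    zextGo s i fuel cur = zv s i := by
  intro fuel
  induction fuel with
  | zero =>
    intro cur hf h
    simp only [zextGo]
    exact (zv_of_stop s i cur hi hin h (by rintro ⟨hc, -⟩; omega)).symm
  | succ fuel ih =>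
    intro cur hf h
    simp only [zextGo]
    split
    · rename_i hc
      apply ih (cur + 1) (by omega)
      intro t ht
      by_cases h' : t < cur
      · exact h t h'
      · have : t = cur := by omega
        subst this
        exact ⟨hc.1, hc.2⟩
    · rename_i hc
      exact (zv_of_stop s i cur hi hin h hc).symm

theorem zext_eq (s : List Char) (i cur : Nat) (hi : 1 ≤ i) (hin : i ≤ s.length)
    (h : ∀ t, t < cur → i + t < s.length ∧ s.getD (i + t) ' ' = s.getD t ' ') :
    zext s i cur = zv s i := by
  unfold zext
  exact zextGo_eq s i hi hin _ cur (by omega) h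

theorem getD_set_self (z : List Nat) (i v : Nat) (h : i < z.length) :
    (z.set i v).getD i 0 = v := by
  simp [List.getD_eq_getElem?_getD, List.getElem?_set_self h]

theorem getD_set_ne (z : List Nat) (i j v : Nat) (h : i ≠ j) :
    (z.set i v).getD j 0 = z.getD j 0 := by
  simp [List.getD_eq_getElem?_getD, List.getElem?_set_ne h]

theorem zloopGo_inv (s : List Char) :
    ∀ fuel i z left right, s.length ≤ i + fuel → 1 ≤ i → z.length = s.length →
    (∀ j, 1 ≤ j → j < i → z.getD j 0 = zv s j) →
    left = i - 1 →
    (∀ t, left + t ≤ right → left + t < s.length ∧ s.getD (left + t) ' ' = s.getD t ' ') →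
    (right < i ∨ 2 ≤ i) →
    ∀ j, 1 ≤ j → j < s.length → (zloopGo s fuel i z left right).getD j 0 = zv s j := by
  intro fuel
  induction fuel with
  | zero =>
    intro i z left right hf hi hlen hzlt hleft hbox hr j hj1 hjlen
    simp only [zloopGo]
    exact hzlt j hj1 (by omega)
  | succ fuel ih =>
    intro i z left right hf hi hlen hzlt hleft hbox hr j hj1 hjlen
    simp only [zloopGo]
    by_cases hilt : i < s.length
    · rw [if_pos hilt]
      have hkey : (if right < i then zext s i 0
          else if i + z.getD (i - left) 0 ≤ right then z.getD (i - left) 0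
          else zext s i (right - i + 1)) = zv s i := by
        by_cases hri : right < i
        · rw [if_pos hri]
          exact zext_eq s i 0 hi (le_of_lt hilt) (by intro t ht; omega)
        · rw [if_neg hri]
          have hi2 : 2 ≤ i := by rcases hr with h | h; omega; exact h
          have hil : i - left = 1 := by omega
          rw [hil]
          have hz1 : z.getD 1 0 = zv s 1 := hzlt 1 le_rfl (by omega)
          have hrlen : right < s.length := by
            have h' := (hbox (right - left) (by omega)).1
            omega
          obtain ⟨hb1, hm1, hs1⟩ :=
            (zv_eq_iff s 1 (zv s 1) le_rfl (by omega)).mp rfl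
          rw [hz1]
          by_cases hcopy : i + zv s 1 ≤ right
          · rw [if_pos hcopy]
            symm
            refine (zv_eq_iff s i (zv s 1) hi (le_of_lt hilt)).mpr ⟨by omega, ?_, ?_⟩
            · intro t ht
              have hb := hbox (t + 1) (by omega)
              have heq : left + (t + 1) = i + t := by omega
              rw [heq] at hb
              have hm := hm1 t ht
              rw [Nat.add_comm 1 t] at hm
              exact hm.trans hb.2.symm
            · right
              have hb := hbox (zv s 1 + 1) (by omega)
              have heq : left + (zv s 1 + 1) = i + zv s 1 := by omega
              rw [heq] at hb
              rcases hs1 with h1 | h1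
              · exfalso; omega
              · rw [Nat.add_comm 1 (zv s 1)] at h1
                intro he
                exact h1 (he.trans hb.2)
          · rw [if_neg hcopy]
            apply zext_eq s i (right - i + 1) hi (le_of_lt hilt)
            intro t ht
            have hb := hbox (t + 1) (by omega)
            have heq : left + (t + 1) = i + t := by omega
            rw [heq] at hb
            refine ⟨hb.1, ?_⟩
            have ht1 : t < zv s 1 := by omega
            have hm := hm1 t ht1
            rw [Nat.add_comm 1 t] at hm
            exact hb.2.trans hm.symm
      rw [hkey]
      apply ih (i + 1) (z.set i (zv s i)) i (i + zv s i - 1) (by omega) (by omega)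
        (by simp [hlen]) ?_ rfl ?_ ?_ j hj1 hjlen
      · intro j' hj'1 hj'lt
        by_cases hji : j' = i
        · subst hji
          exact getD_set_self z j' (zv s j') (by omega)
        · rw [getD_set_ne z i j' (zv s i) (fun he => hji he.symm)]
          exact hzlt j' hj'1 (by omega)
      · intro t hti
        rcases Nat.eq_zero_or_pos (zv s i) with hz0 | hzpos
        · exfalso; omega
        · have htlt : t < zv s i := by omega
          obtain ⟨hb, hm, -⟩ :=
            (zv_eq_iff s i (zv s i) hi (le_of_lt hilt)).mp rfl
          exact ⟨by omega, (hm t htlt).symm⟩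
      · rcases Nat.eq_zero_or_pos (zv s i) with hz0 | hzpos
        · left; omega
        · right; omega
    · rw [if_neg hilt]
      exact hzlt j hj1 (by omega)

theorem computeZ_getD (s : List Char) (hs : 0 < s.length) :
    ∀ j, 1 ≤ j → j < s.length → (computeZ s).getD j 0 = zv s j := by
  intro j hj1 hjlen
  unfold computeZ
  apply zloopGo_inv s s.length 1 _ 0 0 (by omega) le_rfl (by simp) ?_ rfl ?_ (by omega) j hj1 hjlen
  · intro j' h1 h2; omega
  · intro t ht
    have : t = 0 := by omega
    subst this
    exact ⟨hs, rfl⟩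

theorem s_getD_lt (p t : List Char) (u : Nat) (hu : u < p.length) :
    (p ++ '$' :: t).getD u ' ' = p.getD u ' ' := by
  rw [List.getD_eq_getElem?_getD, List.getD_eq_getElem?_getD, List.getElem?_append_left hu]

theorem s_getD_sep (p t : List Char) : (p ++ '$' :: t).getD p.length ' ' = '$' := by
  rw [List.getD_eq_getElem?_getD, List.getElem?_append_right le_rfl]
  simp

theorem s_getD_right (p t : List Char) (v : Nat) :
    (p ++ '$' :: t).getD (p.length + 1 + v) ' ' = t.getD v ' ' := by
  rw [List.getD_eq_getElem?_getD, List.getElem?_append_right (by omega)]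
  have h : p.length + 1 + v - p.length = v + 1 := by omega
  rw [h]
  simp [List.getD_eq_getElem?_getD]

theorem prefix_iff_getD (p l : List Char) :
    p <+: l ↔ (p.length ≤ l.length ∧ ∀ u, u < p.length → p.getD u ' ' = l.getD u ' ') := by
  induction p generalizing l with
  | nil => simp
  | cons x ps ih =>
    cases l with
    | nil => simp
    | cons y ls =>
      rw [List.cons_prefix_cons]
      constructor
      · rintro ⟨rfl, hp⟩
        obtain ⟨hl, hu⟩ := (ih ls).mp hp
        refine ⟨by simpa using hl, ?_⟩
        intro u hu'
        cases u with
        | zero => simp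
        | succ u' =>
          simp only [List.getD_cons_succ]
          exact hu u' (by simpa using hu')
      · rintro ⟨hl, hu⟩
        have hx : x = y := by simpa using hu 0 (by simp)
        refine ⟨hx, (ih ls).mpr ⟨by simpa using hl, ?_⟩⟩
        intro u hu'
        simpa using hu (u + 1) (by simp only [List.length_cons]; omega)

theorem zv_s_eq_iff (p t : List Char) (j : Nat) (hj : j < t.length) :
    (zv (p ++ '$' :: t) (p.length + 1 + j) = p.length) ↔ aCondB p t j = true := by
  have hlen : (p ++ '$' :: t).length = p.length + t.length + 1 := by
    simp [List.length_append]; omega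
  rw [zv_eq_iff _ _ _ (by omega) (by omega)]
  simp only [aCondB, occAt, Bool.and_eq_true, Bool.or_eq_true, decide_eq_true_eq,
    Bool.not_eq_true', decide_eq_false_iff_not]
  rw [prefix_iff_getD]
  constructor
  · rintro ⟨h1, h2, h3⟩
    refine ⟨⟨by rw [List.length_drop]; omega, ?_⟩, ?_⟩
    · intro u hu
      have hm := h2 u hu
      rw [s_getD_lt p t u hu] at hm
      have he : p.length + 1 + j + u = p.length + 1 + (j + u) := by omega
      rw [he, s_getD_right p t (j + u)] at hm
      rw [getD_drop]
      exact hm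
    · rcases h3 with h3 | h3
      · left; omega
      · right
        rw [s_getD_sep] at h3
        have he : p.length + 1 + j + p.length = p.length + 1 + (j + p.length) := by omega
        rw [he, s_getD_right] at h3
        exact fun hc => h3 hc.symm
  · rintro ⟨⟨hl, hu⟩, hstop⟩
    have hjm : j + p.length ≤ t.length := by rw [List.length_drop] at hl; omega
    refine ⟨by omega, ?_, ?_⟩
    · intro u hu'
      rw [s_getD_lt p t u hu']
      have he : p.length + 1 + j + u = p.length + 1 + (j + u) := by omega
      rw [he, s_getD_right]
      have hm := hu u hu'
      rwa [getD_drop] at hm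
    · rcases hstop with h | h
      · left; omega
      · right
        rw [s_getD_sep]
        have he : p.length + 1 + j + p.length = p.length + 1 + (j + p.length) := by omega
        rw [he, s_getD_right]
        exact fun hc => h hc.symm

theorem foldl_if_append (l : List Nat) (P : Nat → Prop) [DecidablePred P] (f : Nat → Int)
    (acc : List Int) :
    l.foldl (fun ans i => if P i then ans ++ [f i] else ans) acc =
      acc ++ (l.filter (fun i => decide (P i))).map f := by
  induction l generalizing acc with
  | nil => simp
  | cons x xs ih =>
    simp only [List.foldl_cons, List.filter_cons]
    by_cases hx : P x
    · rw [if_pos hx, ih]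
      simp [hx]
    · rw [if_neg hx, ih]
      simp [hx]

theorem search_eq (pattern text : String) :
    search pattern text =
      ((List.range text.toList.length).filter (aCondB pattern.toList text.toList)).map
        (fun j : Nat => (j : Int)) := by
  simp only [search]
  have hslen : (pattern.toList ++ '$' :: text.toList).length =
      pattern.toList.length + text.toList.length + 1 := by
    simp [List.length_append]; omega
  rw [foldl_if_append, hslen]
  have hn : pattern.toList.length + text.toList.length + 1 - (pattern.toList.length + 1) =
      text.toList.length := by omega
  rw [hn, List.nil_append, List.range'_eq_map_range, List.filter_map, List.map_map]
  have hfil : ((List.range text.toList.length).filter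
        ((fun i => decide ((computeZ (pattern.toList ++ '$' :: text.toList)).getD i 0 =
          pattern.toList.length)) ∘ (fun x => pattern.toList.length + 1 + x))) =
      (List.range text.toList.length).filter (aCondB pattern.toList text.toList) := by
    apply List.filter_congr
    intro j hj
    rw [List.mem_range] at hj
    simp only [Function.comp]
    have hz := computeZ_getD (pattern.toList ++ '$' :: text.toList) (by rw [hslen]; omega)
      (pattern.toList.length + 1 + j) (by omega) (by rw [hslen]; omega)
    rw [hz, Bool.eq_iff_iff]
    simp only [decide_eq_true_eq]
    exact zv_s_eq_iff pattern.toList text.toList j hj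
  rw [hfil]
  apply List.map_congr_left
  intro j hj
  simp only [Function.comp]
  push_cast
  omega

theorem search_alt_eq (pattern text : String) :
    search_alt pattern text =
      ((List.range text.toList.length).filter (occAt pattern.toList text.toList)).map
        (fun j : Nat => (j : Int)) := by
  simp only [search_alt]
  rw [PySem.List.pyRange_zero_natCast, List.filter_map]
  congr 1
  apply List.filter_congr
  intro j hj
  rw [List.mem_range] at hj
  simp only [Function.comp]
  have hcast : ((j : Int) + (pattern.toList.length : Int)) =
      ((j : Int) + ((pattern.toList.length : Nat) : Int)) := rfl
  rw [PySem.List.slice_natCast_add]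
  rw [Bool.eq_iff_iff]
  simp only [occAt, beq_iff_eq, decide_eq_true_eq]
  rw [List.prefix_iff_eq_take]
  constructor
  · intro h; exact h.symm
  · intro h; exact h.symm

-- the dollar-occurrence witness extracted from / rebuilt into D_search
theorem D_iff_witness (p t : List Char) :
    (dollarFollows p t = true) ↔
      ∃ j, (p <+: t.drop j) ∧ j + p.length < t.length ∧ t.getD (j + p.length) ' ' = '$' := by
  unfold dollarFollows
  simp only [List.any_eq_true, List.mem_range, Bool.and_eq_true, beq_iff_eq, decide_eq_true_eq]
  constructor
  · rintro ⟨k, hk, ⟨hd, hm⟩, htake⟩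
    refine ⟨k - p.length, List.prefix_iff_eq_take.mpr htake.symm, by omega, ?_⟩
    rw [show k - p.length + p.length = k by omega]
    exact hd
  · rintro ⟨j, hpre, hlt, hdol⟩
    refine ⟨j + p.length, hlt, ⟨?_, by omega⟩, ?_⟩
    · exact hdol
    · rw [show j + p.length - p.length = j by omega]
      exact (List.prefix_iff_eq_take.mp hpre).symm

theorem not_D_conds_eq (p t : List Char) (hND : ¬ dollarFollows p t = true) (j : Nat)
    (hjn : j < t.length) :
    aCondB p t j = occAt p t j := by
  unfold aCondB
  by_cases hocc : occAt p t j = true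
  · rw [hocc, Bool.true_and]
    have hpre : p <+: t.drop j := by simpa [occAt] using hocc
    have hjm : j + p.length ≤ t.length := by
      obtain ⟨hl, -⟩ := (prefix_iff_getD p (t.drop j)).mp hpre
      rw [List.length_drop] at hl
      omega
    by_cases he : j + p.length = t.length
    · simp [he]
    · have hlt : j + p.length < t.length := by omega
      have hnd : t.getD (j + p.length) ' ' ≠ '$' := by
        intro hd
        exact hND ((D_iff_witness p t).mpr ⟨j, hpre, hlt, hd⟩)
      rw [List.getD_eq_getElem?_getD] at hnd
      simp [he, hnd]
  · simp only [Bool.not_eq_true] at hocc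
    rw [hocc]
    simp

-- ===== VERDICT (by name: the statement is the Claim_ definition above) =====
theorem search_spec : Claim_unchanged_search := by
  intro pattern text _ hND
  show search pattern text = search_alt pattern text
  rw [search_eq, search_alt_eq]
  congr 1
  apply List.filter_congr
  intro j hj
  rw [List.mem_range] at hj
  exact not_D_conds_eq pattern.toList text.toList hND j hj

theorem search_changed : Claim_changed_search := by
  unfold Claim_changed_search; decide

theorem search_tight : Claim_exact_search := by
  intro pattern text _ hD heq
  obtain ⟨j, hpre, hlt, hdol⟩ := (D_iff_witness pattern.toList text.toList).mp hD
  rw [search_eq, search_alt_eq] at heq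
  have hjn : j < text.toList.length := by omega
  have hB : (j : Int) ∈ ((List.range text.toList.length).filter
      (occAt pattern.toList text.toList)).map (fun j : Nat => (j : Int)) := by
    simp only [List.mem_map, List.mem_filter, List.mem_range]
    exact ⟨j, ⟨hjn, by simpa [occAt] using hpre⟩, rfl⟩
  rw [← heq] at hB
  simp only [List.mem_map, List.mem_filter, List.mem_range] at hB
  obtain ⟨k, ⟨hk, hcond⟩, hkj⟩ := hB
  have hkj' : k = j := by exact_mod_cast hkj
  subst hkj'
  simp only [aCondB, Bool.and_eq_true, Bool.or_eq_true, decide_eq_true_eq,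
    Bool.not_eq_true', decide_eq_false_iff_not] at hcond
  rcases hcond.2 with h | h
  · omega
  · exact h hdol
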